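-- pv_equiv track=rewrite | github.com/daqcri/PFD_Demo | pfd.py | tok_pos_info_det
-- ===== SOURCE A (Python) =====
-- def tok_pos_info_det(TPs):
--     pos_lists = []
--     for ii in range(len(pos_lists)):
--         pos_lists.remove(pos_lists[0])
--     ((a, dep1), b) = TPs[0]
--     a11 = a.rsplit('::', 1)
--     a22 = a11[1].split(',')
--     num_atts = len(a22)
--     for i in range(num_atts):
--         d = dict()
--         d.clear()
--         pos_lists.append(d)
--     for TP in TPs:
--         ((a, dep1), b) = TP
--         a11 = a.rsplit('::', 1)
--         a22 = a11[1].split(',')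
--         for jj in range(num_atts):
--             tok_pos = a22[jj]
--             if tok_pos in pos_lists[jj]:
--                 pos_lists[jj][tok_pos] += 1
--             else:
--                 pos_lists[jj][tok_pos] = 1
--     return pos_lists, num_atts
-- ===== SOURCE B (Python) =====
-- def tok_pos_info_det(TPs):
--     ((a, _dep), _b) = TPs[0]
--     num_atts = len(a.rsplit('::', 1)[1].split(','))
--     toks = [x.rsplit('::', 1)[1].split(',') for ((x, _d), _y) in TPs]
--     pos_lists = []
--     for jj in range(num_atts):
--         col = [tr[jj] for tr in toks]
--         pos_lists.append({t: col.count(t) for t in dict.fromkeys(col)})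
--     return pos_lists, num_atts
-- ===== Notes on version B (the rewrite author's own statement) =====
-- stated objective: alternative
-- what changed: Replaces A's row-major nested loops that increment a list of dicts in place by a column-major pass: parse every row once, then for each attribute column build the token list and produce its frequency dict directly via ordered dedup + count.
import Mathlib
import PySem

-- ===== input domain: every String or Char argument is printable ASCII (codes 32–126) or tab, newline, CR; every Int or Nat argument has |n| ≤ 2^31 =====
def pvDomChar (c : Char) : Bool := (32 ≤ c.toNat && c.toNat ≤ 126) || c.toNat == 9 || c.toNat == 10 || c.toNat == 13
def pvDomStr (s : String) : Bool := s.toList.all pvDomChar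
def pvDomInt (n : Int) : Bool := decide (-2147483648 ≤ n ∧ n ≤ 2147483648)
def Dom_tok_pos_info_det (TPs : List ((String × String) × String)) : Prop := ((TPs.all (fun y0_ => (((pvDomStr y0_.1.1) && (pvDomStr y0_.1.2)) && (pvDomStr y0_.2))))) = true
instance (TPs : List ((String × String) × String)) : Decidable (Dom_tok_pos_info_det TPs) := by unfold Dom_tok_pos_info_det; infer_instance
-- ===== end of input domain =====

-- B is an alternative, column-major re-implementation: parse each row once, then count each
-- attribute column directly (ordered dedup + count) instead of A's in-place dict increments.

-- shared hand port of the builtin s.rsplit(sep, 1) for nonempty sep (exact: split at the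
-- highest occurrence of sep, found with PySem.Str.rfind; [s] when sep does not occur)
def pyRsplit1 (s sep : String) : List String :=
  let i := PySem.Str.rfind s sep
  if i < 0 then [s]
  else [String.ofList (s.toList.take i.toNat),
        String.ofList (s.toList.drop (i.toNat + (PySem.Str.len sep).toNat))]

-- hand port of the builtin s.split(sep) for nonempty sep (exact: PySem.Chars.splitOn is s.split(sep))
def pySplit (s sep : String) : List String :=
  (PySem.Chars.splitOn s.toList sep.toList).map String.ofList

-- a.rsplit('::', 1)[1].split(',') — the token list of one element ([] when '::' is absent,
-- in which case Python raises on the [1] indexing; such inputs lie outside Pre_)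
def rowToks (p : (String × String) × String) : List String :=
  match PySem.List.pyGet? (pyRsplit1 p.1.1 "::") 1 with
  | none => []
  | some t => pySplit t ","

-- ===== PORT A =====
-- loop body: if tok_pos in pos_lists[jj]: pos_lists[jj][tok_pos] += 1 else: pos_lists[jj][tok_pos] = 1
def tpdStep (d : PySem.Dict String Int) (tok : String) : PySem.Dict String Int :=
  if d.contains tok then d.insert tok (d.getD tok 0 + 1) else d.insert tok 1

-- for jj in range(num_atts): tok_pos = a22[jj]; <tpdStep on pos_lists[jj]>
-- (a22[jj] out of range raises IndexError in Python: outside Pre_, the port skips)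
def innerLoop (a22 : List String) (n : Nat) (pls : List (PySem.Dict String Int)) :
    List (PySem.Dict String Int) :=
  (PySem.List.pyRange 0 (n : Int) 1).foldl (fun pls jj =>
    match PySem.List.pyGet? a22 jj with
    | none => pls
    | some tok => pls.modify jj.toNat (fun d => tpdStep d tok)) pls

def tok_pos_info_det (TPs : List ((String × String) × String)) : (List (List (String × Int))) × Int :=
  match TPs with
  | [] => ([], 0)            -- TPs[0] raises IndexError: outside Pre_
  | p0 :: _ =>
    match PySem.List.pyGet? (pyRsplit1 p0.1.1 "::") 1 with
    | none => ([], 0)        -- a11[1] raises IndexError: outside Pre_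
    | some t =>
      let numAtts := (pySplit t ",").length
      let init := (PySem.List.pyRange 0 (numAtts : Int) 1).foldl
        (fun acc _ => acc ++ [(PySem.Dict.empty : PySem.Dict String Int)]) []
      let final := TPs.foldl (fun pls TP => innerLoop (rowToks TP) numAtts pls) init
      (final.map PySem.Dict.items, (numAtts : Int))

-- ===== PORT B =====
def tok_pos_info_det_alt (TPs : List ((String × String) × String)) : (List (List (String × Int))) × Int :=
  match TPs with
  | [] => ([], 0)            -- TPs[0] raises IndexError: outside Pre_
  | p0 :: _ =>
    match PySem.List.pyGet? (pyRsplit1 p0.1.1 "::") 1 with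
    | none => ([], 0)        -- [1] raises IndexError: outside Pre_
    | some t =>
      let numAtts := (pySplit t ",").length
      let toks := TPs.map rowToks
      let posLists := (PySem.List.pyRange 0 (numAtts : Int) 1).map (fun jj =>
        let col := toks.map (fun tr => (PySem.List.pyGet? tr jj).getD "")   -- tr[jj] (in range on Pre_)
        (PySem.List.dedup col).map (fun k => (k, (col.count k : Int))))     -- {t: col.count(t) for t in dict.fromkeys(col)}
      (posLists, (numAtts : Int))

-- ===== PRECONDITION & SPEC =====
-- Pre_ = exactly where A returns: TPs nonempty, the first attribute string contains '::'
-- (0 ≤ rfind), and every row has at least as many tokens after its last '::' as the first row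
-- (a row lacking '::' has rowToks = [] and is thereby excluded as well).
def Pre_tok_pos_info_det (TPs : List ((String × String) × String)) : Prop :=
  TPs ≠ [] ∧
  0 ≤ PySem.Str.rfind (TPs.headD ((("", ""), ""))).1.1 "::" ∧
  ∀ p ∈ TPs, (rowToks (TPs.headD ((("", ""), "")))).length ≤ (rowToks p).length
instance (TPs : List ((String × String) × String)) : Decidable (Pre_tok_pos_info_det TPs) := by
  unfold Pre_tok_pos_info_det; infer_instance

def pvWitness_tok_pos_info_det : (List ((String × String) × String)) := [(("x::u,v", "d"), "b")]

def Spec_tok_pos_info_det (TPs : List ((String × String) × String)) (out : (List (List (String × Int))) × Int) : Prop := out = tok_pos_info_det_alt TPs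
instance (TPs : List ((String × String) × String)) (out : (List (List (String × Int))) × Int) : Decidable (Spec_tok_pos_info_det TPs out) := by unfold Spec_tok_pos_info_det; infer_instance

-- ===== CLAIM (what is proved, stated in full; the proofs are below) =====
def Claim_equal_tok_pos_info_det : Prop := ∀ (TPs : List ((String × String) × String)), Dom_tok_pos_info_det TPs → Pre_tok_pos_info_det TPs → Spec_tok_pos_info_det TPs (tok_pos_info_det TPs)

-- ===== LEMMAS AND PROOFS =====

theorem tpdStep_eq (d : PySem.Dict String Int) (tok : String) :
    tpdStep d tok = d.insert tok (d.getD tok 0 + 1) := by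
  unfold tpdStep
  by_cases h : d.contains tok = true
  · simp [h]
  · simp only [Bool.not_eq_true] at h
    simp [h, PySem.Dict.getD_of_not_contains d (0 : Int) h]

theorem foldl_append_singleton {α β : Type} (l : List α) (e : β) (init : List β) :
    l.foldl (fun acc _ => acc ++ [e]) init = init ++ List.replicate l.length e := by
  induction l generalizing init with
  | nil => simp
  | cons x xs ih =>
    rw [List.foldl_cons, ih, List.length_cons, List.replicate_succ',
      List.append_assoc]
    congr 1
    rw [List.singleton_append, ← List.replicate_succ, List.replicate_succ']

theorem innerLoop_aux (a22 : List String) (d : Nat) :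
    ∀ (m : Nat) (ds : List (PySem.Dict String Int)), m + d = ds.length →
      ds.length ≤ a22.length →
      (PySem.List.pyRange (m : Int) (ds.length : Int) 1).foldl (fun pls jj =>
        match PySem.List.pyGet? a22 jj with
        | none => pls
        | some tok => pls.modify jj.toNat (fun d => tpdStep d tok)) ds
      = ds.take m ++ List.zipWith tpdStep (ds.drop m) (a22.drop m) := by
  induction d with
  | zero =>
    intro m ds hm hle
    have hmlen : m = ds.length := by omega
    rw [PySem.List.pyRange_one_eq_nil (by exact_mod_cast le_of_eq hmlen.symm)]
    simp [hmlen]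
  | succ d ih =>
    intro m ds hm hle
    have hmlt : m < ds.length := by omega
    have hmlt' : m < a22.length := by omega
    rw [PySem.List.pyRange_one_cons (by exact_mod_cast hmlt)]
    rw [List.foldl_cons]
    have hget : PySem.List.pyGet? a22 (m : Int) = some a22[m] := by
      rw [PySem.List.pyGet?_natCast, List.getElem?_eq_getElem hmlt']
    rw [hget]
    simp only [Int.toNat_natCast]
    set ds' := ds.modify m (fun d => tpdStep d a22[m]) with hds'
    have hds'eq : ds' = ds.take m ++ tpdStep ds[m] a22[m] :: ds.drop (m + 1) := by
      rw [hds', List.modify_eq_take_cons_drop hmlt]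
    have hlen' : ds'.length = ds.length := by rw [hds']; simp
    have hcast : ((m : Int) + 1) = ((m + 1 : Nat) : Int) := by push_cast; ring
    rw [hcast, ← hlen']
    rw [ih (m + 1) ds' (by omega) (by omega)]
    have htake : ds'.take (m + 1) = ds.take m ++ [tpdStep ds[m] a22[m]] := by
      rw [hds'eq, List.take_append]
      have h1 : (ds.take m).length = m := by simp [Nat.le_of_lt hmlt]
      rw [List.take_of_length_le (by omega), h1]
      simp
    have hdrop : ds'.drop (m + 1) = ds.drop (m + 1) := by
      rw [hds'eq, List.drop_append]
      have h1 : (ds.take m).length = m := by simp [Nat.le_of_lt hmlt]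
      rw [List.drop_of_length_le (by omega), h1]
      simp
    rw [htake, hdrop]
    rw [List.drop_eq_getElem_cons hmlt, List.drop_eq_getElem_cons hmlt',
      List.zipWith_cons_cons]
    simp

theorem innerLoop_eq (a22 : List String) (ds : List (PySem.Dict String Int))
    (hle : ds.length ≤ a22.length) :
    innerLoop a22 ds.length ds = List.zipWith tpdStep ds a22 := by
  have h := innerLoop_aux a22 ds.length 0 ds (by omega) hle
  simpa [innerLoop] using h

theorem outer_eq (n : Nat) (rows : List ((String × String) × String))
    (hrows : ∀ r ∈ rows, n ≤ (rowToks r).length) :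
    ∀ (ds : List (PySem.Dict String Int)), ds.length = n →
      rows.foldl (fun pls TP => innerLoop (rowToks TP) n pls) ds
      = (List.range n).map (fun j =>
          (rows.map (fun r => (rowToks r).getD j "")).foldl tpdStep
            (ds.getD j PySem.Dict.empty)) := by
  induction rows with
  | nil =>
    intro ds hlen
    simp only [List.foldl_nil, List.map_nil]
    apply List.ext_getElem
    · simp [hlen]
    · intro j h1 h2
      simp only [List.getElem_map, List.getElem_range]
      rw [List.getD_eq_getElem ds _ (by omega)]
  | cons r rows ih =>
    intro ds hlen
    have hr : n ≤ (rowToks r).length := hrows r (by simp)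
    rw [List.foldl_cons]
    have h1 : innerLoop (rowToks r) n ds = List.zipWith tpdStep ds (rowToks r) := by
      rw [← hlen] at hr ⊢
      exact innerLoop_eq (rowToks r) ds hr
    rw [h1]
    rw [ih (fun r hr => hrows r (by simp [hr])) _ (by simp; omega)]
    apply List.map_congr_left
    intro j hj
    rw [List.mem_range] at hj
    have hj2 : j < (rowToks r).length := by omega
    have hz : (List.zipWith tpdStep ds (rowToks r)).getD j PySem.Dict.empty
        = tpdStep (ds.getD j PySem.Dict.empty) ((rowToks r).getD j "") := by
      rw [List.getD_eq_getElem _ _ (by simp; omega), List.getElem_zipWith,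
        List.getD_eq_getElem ds _ (by omega), List.getD_eq_getElem _ _ hj2]
    rw [hz]
    simp [List.foldl_cons]

theorem getD_replicate_self {α : Type} (n j : Nat) (e : α) :
    (List.replicate n e).getD j e = e := by
  by_cases h : j < n
  · rw [List.getD_eq_getElem _ _ (by simpa using h)]; simp
  · rw [List.getD_eq_default _ _ (by simpa using Nat.le_of_not_lt h)]

theorem col_counter (col : List String) :
    (col.foldl tpdStep PySem.Dict.empty).items
      = (PySem.List.dedup col).map (fun k => (k, (col.count k : Int))) := by
  have hstep : tpdStep = fun d t => d.insert t (d.getD t 0 + 1) := by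
    funext d t; exact tpdStep_eq d t
  rw [hstep, PySem.Dict.foldl_insert_getD_add_one_eq_counter,
    PySem.Dict.items_counter]
  simp

-- ===== VERDICT (by name: the statement is the Claim_ definition above) =====
theorem tok_pos_info_det_spec : Claim_equal_tok_pos_info_det := by
  unfold Claim_equal_tok_pos_info_det
  intro TPs _hDom hPre
  obtain ⟨hne, hrf, hlen⟩ := hPre
  unfold Spec_tok_pos_info_det
  cases TPs with
  | nil => exact absurd rfl hne
  | cons p0 rest =>
    simp only [List.headD_cons] at hrf hlen
    -- the head string contains '::', so pyRsplit1 has two pieces and [1] succeeds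
    have hsplit : pyRsplit1 p0.1.1 "::"
        = [String.ofList (p0.1.1.toList.take (PySem.Str.rfind p0.1.1 "::").toNat),
           String.ofList (p0.1.1.toList.drop ((PySem.Str.rfind p0.1.1 "::").toNat
             + (PySem.Str.len "::").toNat))] := by
      unfold pyRsplit1
      rw [if_neg (by omega)]
    have hget : PySem.List.pyGet? (pyRsplit1 p0.1.1 "::") 1
        = some (String.ofList (p0.1.1.toList.drop ((PySem.Str.rfind p0.1.1 "::").toNat
             + (PySem.Str.len "::").toNat))) := by
      rw [hsplit]; rfl
    -- reduce both ports to their some-branch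
    simp only [tok_pos_info_det, tok_pos_info_det_alt, hget]
    set t := String.ofList (p0.1.1.toList.drop ((PySem.Str.rfind p0.1.1 "::").toNat
      + (PySem.Str.len "::").toNat)) with ht
    have hrow0 : rowToks p0 = pySplit t "," := by
      unfold rowToks; rw [hget]
    set n := (pySplit t ",").length with hn
    have hlen' : ∀ p ∈ p0 :: rest, n ≤ (rowToks p).length := by
      intro p hp
      rw [hn, ← hrow0]
      exact hlen p hp
    -- A's initial list of fresh dicts is replicate n empty
    have hinit : (PySem.List.pyRange 0 (n : Int) 1).foldl
        (fun acc _ => acc ++ [(PySem.Dict.empty : PySem.Dict String Int)]) []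
        = List.replicate n (PySem.Dict.empty : PySem.Dict String Int) := by
      rw [foldl_append_singleton, PySem.List.length_pyRange_one]
      simp
    rw [hinit]
    have hfinal := outer_eq n (p0 :: rest) hlen'
      (List.replicate n (PySem.Dict.empty : PySem.Dict String Int)) (by simp)
    rw [hfinal]
    -- B's pyRange-map as a range-map
    rw [PySem.List.pyRange_one]
    simp only [Int.sub_zero, Int.toNat_natCast, List.map_map, List.map_map]
    apply Prod.ext
    · simp only []
      apply List.map_congr_left
      intro j hj
      rw [List.mem_range] at hj
      simp only [Function.comp_def]
      have hcolB : (p0 :: rest).map (fun r =>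
            (PySem.List.pyGet? (rowToks r) ((0 : Int) + (j : Int))).getD "")
          = (p0 :: rest).map (fun r => (rowToks r).getD j "") := by
        apply List.map_congr_left
        intro r hr
        have hjr : j < (rowToks r).length := by
          have := hlen' r hr; omega
        rw [zero_add, PySem.List.pyGet?_natCast, List.getElem?_eq_getElem hjr,
          Option.getD_some, List.getD_eq_getElem _ _ hjr]
      rw [hcolB, getD_replicate_self, col_counter]
    · rfl
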